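-- pv_equiv track=rewrite | github.com/polygon-io/pg_catalog | tests/test_captures.py | convert_placeholders
-- ===== SOURCE A (Python) =====
-- def convert_placeholders(q: str) -> str:
--     out = []
--     i = 0
--     while i < len(q):
--         if q[i] == "$":
--             j = i + 1
--             while j < len(q) and q[j].isdigit():
--                 j += 1
--             if j > i + 1:
--                 out.append("%s")
--                 i = j
--                 continue
--         out.append(q[i])
--         i += 1
--     return "".join(out)
-- ===== SOURCE B (Python) =====
-- def convert_placeholders(q: str) -> str:
--     parts = q.split("$")
--     res = [parts[0]]
--     for p in parts[1:]:
--         stripped = p.lstrip("0123456789")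
--         if len(stripped) < len(p):
--             res.append("%s" + stripped)
--         else:
--             res.append("$" + p)
--     return "".join(res)
-- ===== Notes on version B (the rewrite author's own statement) =====
-- stated objective: faster
-- what changed: Replaces A's hand-rolled per-character index-based while-loop scanner with a split pass on the dollar separator: split the string, strip the leading digit run from each later piece, emit the placeholder marker where digits were stripped and restore the separator otherwise.
import Mathlib
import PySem

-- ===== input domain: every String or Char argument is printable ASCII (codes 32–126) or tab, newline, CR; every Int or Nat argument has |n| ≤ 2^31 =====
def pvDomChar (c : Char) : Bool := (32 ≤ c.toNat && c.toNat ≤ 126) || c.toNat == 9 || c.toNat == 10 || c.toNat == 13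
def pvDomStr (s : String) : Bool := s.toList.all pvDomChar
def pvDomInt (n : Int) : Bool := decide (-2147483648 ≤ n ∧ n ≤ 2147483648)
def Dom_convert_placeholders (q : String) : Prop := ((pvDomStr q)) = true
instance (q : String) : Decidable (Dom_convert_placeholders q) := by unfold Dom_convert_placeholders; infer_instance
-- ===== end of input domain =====

-- B replaces A's hand-rolled index scanner by a split-on-'$' pass (simpler decomposition, same cost).

-- ===== PORT A =====
-- Outer while over the characters; the inner digit-scanning while `while j < len(q) and q[j].isdigit()`
-- is transliterated as takeWhile/dropWhile Char.isDigit (exact: Python's str.isdigit coincides with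
-- Char.isDigit on the ASCII domain); the test `j > i + 1` is `takeWhile ≠ []`.
def convert_placeholders_A_loop : List Char → List Char
  | [] => []
  | c :: rest =>
    if c = '$' then
      if rest.takeWhile Char.isDigit = [] then
        c :: convert_placeholders_A_loop rest
      else
        '%' :: 's' :: convert_placeholders_A_loop (rest.dropWhile Char.isDigit)
    else c :: convert_placeholders_A_loop rest
termination_by l => l.length
decreasing_by
  · simp
  · exact Nat.lt_succ_of_le (List.length_dropWhile_le _ _)
  · simp

def convert_placeholders (q : String) : String :=
  String.mk (convert_placeholders_A_loop q.toList)

-- ===== PORT B =====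
-- Source B: split the string on '$'; keep the first piece; every later piece either had its leading
-- digit run stripped (emit "%s" ++ remainder) or is re-prefixed with '$'. lstrip("0123456789") is
-- dropWhile Char.isDigit; `len(stripped) < len(p)` is the same length comparison.
def convert_placeholders_B_piece (p : List Char) : List Char :=
  let stripped := p.dropWhile Char.isDigit
  if stripped.length < p.length then '%' :: 's' :: stripped else '$' :: p

def convert_placeholders_B_join : List (List Char) → List Char
  | [] => []
  | h :: t => h ++ (t.map convert_placeholders_B_piece).flatten

def convert_placeholders_alt (q : String) : String :=
  String.mk (convert_placeholders_B_join (q.toList.splitOn '$'))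

-- ===== PRECONDITION & SPEC =====
def Spec_convert_placeholders (q : String) (out : String) : Prop := out = convert_placeholders_alt q
instance (q : String) (out : String) : Decidable (Spec_convert_placeholders q out) := by unfold Spec_convert_placeholders; infer_instance

-- ===== CLAIM (what is proved, stated in full; the proofs are below) =====
def Claim_equal_convert_placeholders : Prop := ∀ (q : String), Dom_convert_placeholders q → Spec_convert_placeholders q (convert_placeholders q)

-- ===== LEMMAS AND PROOFS =====

-- a digit character is never the separator '$'
theorem cp_digit_ne (c : Char) (h : Char.isDigit c = true) : (c == '$') = false := by
  rcases Bool.eq_false_or_eq_true (c == '$') with h1 | h1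
  · exact absurd h (by rw [show c = '$' from eq_of_beq h1]; decide)
  · exact h1

-- stripping the leading digit run before splitting = splitting, then stripping it from the head piece
theorem cp_split_dropWhile (l : List Char) :
    (l.dropWhile Char.isDigit).splitOnP (· == '$') =
      (l.splitOnP (· == '$')).modifyHead (List.dropWhile Char.isDigit) := by
  induction l with
  | nil => simp [List.splitOnP_nil]
  | cons c rest ih =>
    obtain ⟨h, t, hs⟩ := List.exists_cons_of_ne_nil (List.splitOnP_ne_nil (· == '$') rest)
    by_cases hd : Char.isDigit c = true
    · rw [List.dropWhile_cons_of_pos hd, ih, List.splitOnP_cons, cp_digit_ne c hd]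
      simp [hs, hd]
    · have hd' : Char.isDigit c = false := by simpa using hd
      rw [List.dropWhile_cons_of_neg hd, List.splitOnP_cons]
      by_cases h1 : (c == '$') = true
      · rw [if_pos h1, List.modifyHead_cons, List.dropWhile_nil]
      · rw [if_neg h1, hs, List.modifyHead_cons, List.modifyHead_cons,
          List.dropWhile_cons_of_neg hd]

-- the leading digit run of l is the leading digit run of the first '$'-piece
theorem cp_split_takeWhile (l : List Char) :
    l.takeWhile Char.isDigit = ((l.splitOnP (· == '$')).headI).takeWhile Char.isDigit := by
  induction l with
  | nil => simp [List.splitOnP_nil]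
  | cons c rest ih =>
    obtain ⟨h, t, hs⟩ := List.exists_cons_of_ne_nil (List.splitOnP_ne_nil (· == '$') rest)
    by_cases hd : Char.isDigit c = true
    · rw [List.takeWhile_cons_of_pos hd, List.splitOnP_cons, cp_digit_ne c hd]
      simp [hs, hd, ih]
    · have hd' : Char.isDigit c = false := by simpa using hd
      rw [List.takeWhile_cons_of_neg hd, List.splitOnP_cons]
      by_cases h1 : (c == '$') = true
      · rw [if_pos h1, List.headI_cons, List.takeWhile_nil]
      · rw [if_neg h1, hs, List.modifyHead_cons, List.headI_cons,
          List.takeWhile_cons_of_neg hd]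

theorem cp_main (l : List Char) :
    convert_placeholders_A_loop l = convert_placeholders_B_join (l.splitOnP (· == '$')) := by
  induction l using convert_placeholders_A_loop.induct with
  | case1 => simp [convert_placeholders_A_loop, List.splitOnP_nil, convert_placeholders_B_join]
  | case2 rest htw ih =>
    -- head is '$', no digits follow
    obtain ⟨h, t, hs⟩ := List.exists_cons_of_ne_nil (List.splitOnP_ne_nil (· == '$') rest)
    have hq := cp_split_takeWhile rest
    rw [hs, List.headI_cons] at hq
    have htwh : h.takeWhile Char.isDigit = [] := by rw [← hq]; exact htw
    have hdw : h.dropWhile Char.isDigit = h := by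
      have hq := List.takeWhile_append_dropWhile (p := Char.isDigit) (l := h)
      rwa [htwh, List.nil_append] at hq
    rw [convert_placeholders_A_loop, if_pos rfl, if_pos htw, ih, List.splitOnP_cons]
    simp [hs, convert_placeholders_B_join, convert_placeholders_B_piece, hdw]
  | case3 rest htw ih =>
    -- head is '$', a digit run follows
    obtain ⟨h, t, hs⟩ := List.exists_cons_of_ne_nil (List.splitOnP_ne_nil (· == '$') rest)
    have hq := cp_split_takeWhile rest
    rw [hs, List.headI_cons] at hq
    have htwh : h.takeWhile Char.isDigit ≠ [] := by rw [← hq]; exact htw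
    have hsum : (h.takeWhile Char.isDigit).length + (h.dropWhile Char.isDigit).length = h.length := by
      rw [← List.length_append, List.takeWhile_append_dropWhile]
    have hpos : 0 < (h.takeWhile Char.isDigit).length := List.length_pos_of_ne_nil htwh
    have hlen : (h.dropWhile Char.isDigit).length < h.length := by omega
    have hdrop := cp_split_dropWhile rest
    rw [hs] at hdrop
    rw [convert_placeholders_A_loop, if_pos rfl, if_neg htw, ih, hdrop]
    rw [List.splitOnP_cons]
    simp [hs, convert_placeholders_B_join, convert_placeholders_B_piece, hlen]
  | case4 c rest hc ih =>
    obtain ⟨h, t, hs⟩ := List.exists_cons_of_ne_nil (List.splitOnP_ne_nil (· == '$') rest)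
    rw [convert_placeholders_A_loop, if_neg hc, ih, List.splitOnP_cons]
    have h1 : (c == '$') = false := by simpa using hc
    simp [h1, hs, convert_placeholders_B_join]

-- ===== VERDICT (by name: the statement is the Claim_ definition above) =====
theorem convert_placeholders_spec : Claim_equal_convert_placeholders := by
  intro q _
  unfold Spec_convert_placeholders convert_placeholders convert_placeholders_alt
  rw [show q.toList.splitOn '$' = q.toList.splitOnP (· == '$') from rfl, cp_main]
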